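-- pv_equiv track=rewrite | github.com/qiboteam/qibolab | src/qibolab/instruments/emulator/models/methods.py | default_platform_to_simulator_channels
-- ===== SOURCE A (Python) =====
-- import operator
-- from functools import reduce
--
-- def default_platform_to_simulator_channels(
--     qubits_list: list, couplers_list: list
-- ) -> dict:
--     """Returns the default dictionary that maps platform channel names to simulator channel names.
--     Args:
--         qubits_list (list): List of qubit names to be included in the simulation.
--         couplers_list (list): List of coupler names to be included in the simulation.
--
--     Returns:
--         dict: Mapping between platform channel names to simulator chanel names.
--     """
--     return reduce(
--         operator.or_,
--         [{f"drive-{q}": f"D-{q}", f"readout-{q}": f"R-{q}", f"flux-{q}": f"F-{q}"} for q in qubits_list]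
--         + [{f"drive-{c}": f"D-{c}", f"flux-{c}": f"F-{c}"} for c in couplers_list],
--     )
-- ===== SOURCE B (Python) =====
-- def default_platform_to_simulator_channels(
--     qubits_list: list, couplers_list: list
-- ) -> dict:
--     channels = {}
--     for q in qubits_list:
--         channels[f"drive-{q}"] = f"D-{q}"
--         channels[f"readout-{q}"] = f"R-{q}"
--         channels[f"flux-{q}"] = f"F-{q}"
--     for c in couplers_list:
--         channels[f"drive-{c}"] = f"D-{c}"
--         channels[f"flux-{c}"] = f"F-{c}"
--     return channels
-- ===== Notes on version B (the rewrite author's own statement) =====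
-- stated objective: faster
-- what changed: A builds one small dict per qubit/coupler and merges them with reduce(operator.or_), copying the accumulated dict at every step; B inserts the same keys into a single dict in one pass.
-- outside the precondition, e.g. on default_platform_to_simulator_channels([], []): A raises TypeError, B returns {}
-- crash fix: On the empty input (qubits_list = [] and couplers_list = []) A raises TypeError (reduce of an empty sequence with no initial value) while B returns the empty dict {}. — e.g. on default_platform_to_simulator_channels([], []): A raises TypeError, B returns []
import Mathlib
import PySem

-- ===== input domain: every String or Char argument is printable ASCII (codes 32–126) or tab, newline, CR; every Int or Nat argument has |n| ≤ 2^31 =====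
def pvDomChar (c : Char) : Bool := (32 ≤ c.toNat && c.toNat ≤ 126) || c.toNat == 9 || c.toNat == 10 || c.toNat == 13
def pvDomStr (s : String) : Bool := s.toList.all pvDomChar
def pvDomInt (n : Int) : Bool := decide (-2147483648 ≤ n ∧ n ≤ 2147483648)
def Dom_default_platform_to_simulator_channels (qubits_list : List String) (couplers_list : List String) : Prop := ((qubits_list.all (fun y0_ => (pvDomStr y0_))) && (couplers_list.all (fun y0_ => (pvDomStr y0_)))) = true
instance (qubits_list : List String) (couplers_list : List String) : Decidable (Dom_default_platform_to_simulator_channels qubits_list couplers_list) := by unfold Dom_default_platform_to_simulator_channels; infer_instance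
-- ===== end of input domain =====

-- B replaces A's reduce(operator.or_) over per-element dicts (which copies the accumulator at
-- every merge) by a single pass inserting into one dict: asymptotically faster, same mapping.


-- ===== PORT A =====
-- dict union d1 | d2: start from d1, insert every item of d2 (overwrite keeps position)
def pvDictOr (d1 d2 : PySem.Dict String String) : PySem.Dict String String :=
  d2.items.foldl (fun a p => a.insert p.1 p.2) d1

-- {f"drive-{q}": f"D-{q}", f"readout-{q}": f"R-{q}", f"flux-{q}": f"F-{q}"}
def pvQDict (q : String) : PySem.Dict String String :=
  ((PySem.Dict.empty.insert ("drive-" ++ q) ("D-" ++ q)).insert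
      ("readout-" ++ q) ("R-" ++ q)).insert ("flux-" ++ q) ("F-" ++ q)

-- {f"drive-{c}": f"D-{c}", f"flux-{c}": f"F-{c}"}
def pvCDict (c : String) : PySem.Dict String String :=
  (PySem.Dict.empty.insert ("drive-" ++ c) ("D-" ++ c)).insert ("flux-" ++ c) ("F-" ++ c)

-- reduce(operator.or_, qubit dicts ++ coupler dicts); [] case = TypeError, excluded by Pre_
def default_platform_to_simulator_channels (qubits_list : List String) (couplers_list : List String) : List (String × String) :=
  match qubits_list.map pvQDict ++ couplers_list.map pvCDict with
  | [] => []
  | h :: t => (t.foldl pvDictOr h).items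

-- ===== PORT B =====
def default_platform_to_simulator_channels_alt (qubits_list : List String) (couplers_list : List String) : List (String × String) :=
  let d1 := qubits_list.foldl
    (fun d q => ((d.insert ("drive-" ++ q) ("D-" ++ q)).insert
        ("readout-" ++ q) ("R-" ++ q)).insert ("flux-" ++ q) ("F-" ++ q))
    PySem.Dict.empty
  let d2 := couplers_list.foldl
    (fun d c => (d.insert ("drive-" ++ c) ("D-" ++ c)).insert ("flux-" ++ c) ("F-" ++ c)) d1
  d2.items

-- ===== PRECONDITION & SPEC =====
-- Pre_ excludes only the empty input ([], []), on which A's reduce raises TypeError.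
def Pre_default_platform_to_simulator_channels (qubits_list : List String) (couplers_list : List String) : Prop :=
  qubits_list ≠ [] ∨ couplers_list ≠ []
instance (qubits_list : List String) (couplers_list : List String) : Decidable (Pre_default_platform_to_simulator_channels qubits_list couplers_list) := by unfold Pre_default_platform_to_simulator_channels; infer_instance
def pvWitness_default_platform_to_simulator_channels : List String × List String := (["0", "1"], ["c01"])

-- On qubits_list = [] and couplers_list = [] A raises TypeError; B returns the empty dict.
def Raises_default_platform_to_simulator_channels (qubits_list : List String) (couplers_list : List String) : Prop :=
  qubits_list = [] ∧ couplers_list = []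
instance (qubits_list : List String) (couplers_list : List String) : Decidable (Raises_default_platform_to_simulator_channels qubits_list couplers_list) := by unfold Raises_default_platform_to_simulator_channels; infer_instance
def pvRaiseWitness_default_platform_to_simulator_channels : List String × List String := ([], [])
def pvRaiseWitnessOut_default_platform_to_simulator_channels : List (String × String) := []

def Spec_default_platform_to_simulator_channels (qubits_list : List String) (couplers_list : List String) (out : List (String × String)) : Prop := out = default_platform_to_simulator_channels_alt qubits_list couplers_list
instance (qubits_list : List String) (couplers_list : List String) (out : List (String × String)) : Decidable (Spec_default_platform_to_simulator_channels qubits_list couplers_list out) := by unfold Spec_default_platform_to_simulator_channels; infer_instance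

-- ===== CLAIM (what is proved, stated in full; the proofs are below) =====
def Claim_equal_default_platform_to_simulator_channels : Prop := ∀ (qubits_list : List String) (couplers_list : List String), Dom_default_platform_to_simulator_channels qubits_list couplers_list → Pre_default_platform_to_simulator_channels qubits_list couplers_list → Spec_default_platform_to_simulator_channels qubits_list couplers_list (default_platform_to_simulator_channels qubits_list couplers_list)
def Claim_raises_default_platform_to_simulator_channels : Prop := (∀ (qubits_list : List String) (couplers_list : List String), Dom_default_platform_to_simulator_channels qubits_list couplers_list → Raises_default_platform_to_simulator_channels qubits_list couplers_list → ¬ Pre_default_platform_to_simulator_channels qubits_list couplers_list) ∧ (Dom_default_platform_to_simulator_channels (pvRaiseWitness_default_platform_to_simulator_channels.1) (pvRaiseWitness_default_platform_to_simulator_channels.2) ∧ Raises_default_platform_to_simulator_channels (pvRaiseWitness_default_platform_to_simulator_channels.1) (pvRaiseWitness_default_platform_to_simulator_channels.2) ∧ default_platform_to_simulator_channels_alt (pvRaiseWitness_default_platform_to_simulator_channels.1) (pvRaiseWitness_default_platform_to_simulator_channels.2) = pvRaiseWitnessOut_default_platform_to_simulator_channels)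

-- ===== LEMMAS AND PROOFS =====

-- the three key prefixes never collide (first characters differ)
theorem pv_fl_ne_dr (q r : String) : "flux-" ++ q ≠ "drive-" ++ r := by
  intro h
  have h' : ("flux-" ++ q).toList = ("drive-" ++ r).toList := by rw [h]
  simp at h'

theorem pv_fl_ne_ro (q r : String) : "flux-" ++ q ≠ "readout-" ++ r := by
  intro h
  have h' : ("flux-" ++ q).toList = ("readout-" ++ r).toList := by rw [h]
  simp at h'

theorem pv_items_qdict (q : String) :
    (pvQDict q).items =
      [("drive-" ++ q, "D-" ++ q), ("readout-" ++ q, "R-" ++ q), ("flux-" ++ q, "F-" ++ q)] := by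
  unfold pvQDict
  rw [PySem.Dict.items_insert_of_not_contains, PySem.Dict.items_insert_of_not_contains]
  · rfl
  · simp [PySem.Dict.contains_insert]
  · simp [PySem.Dict.contains_insert, pv_fl_ne_dr q q, pv_fl_ne_ro q q]

theorem pv_items_cdict (c : String) :
    (pvCDict c).items = [("drive-" ++ c, "D-" ++ c), ("flux-" ++ c, "F-" ++ c)] := by
  unfold pvCDict
  rw [PySem.Dict.items_insert_of_not_contains]
  · rfl
  · simp [PySem.Dict.contains_insert, pv_fl_ne_dr c c]

theorem pv_or_qdict (d : PySem.Dict String String) (q : String) :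
    pvDictOr d (pvQDict q) =
      ((d.insert ("drive-" ++ q) ("D-" ++ q)).insert
          ("readout-" ++ q) ("R-" ++ q)).insert ("flux-" ++ q) ("F-" ++ q) := by
  unfold pvDictOr
  rw [pv_items_qdict]
  rfl

theorem pv_or_cdict (d : PySem.Dict String String) (c : String) :
    pvDictOr d (pvCDict c) =
      (d.insert ("drive-" ++ c) ("D-" ++ c)).insert ("flux-" ++ c) ("F-" ++ c) := by
  unfold pvDictOr
  rw [pv_items_cdict]
  rfl

-- merging an element-dict into the empty dict gives it back
theorem pv_or_empty_qdict (q : String) : pvDictOr PySem.Dict.empty (pvQDict q) = pvQDict q := by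
  rw [pv_or_qdict]; rfl

theorem pv_or_empty_cdict (c : String) : pvDictOr PySem.Dict.empty (pvCDict c) = pvCDict c := by
  rw [pv_or_cdict]; rfl

-- B's two loops ARE a fold of dict-union over the element dicts, seeded with {}
theorem pv_alt_eq_foldl (qs cs : List String) :
    default_platform_to_simulator_channels_alt qs cs =
      ((qs.map pvQDict ++ cs.map pvCDict).foldl pvDictOr PySem.Dict.empty).items := by
  unfold default_platform_to_simulator_channels_alt
  rw [List.foldl_append, List.foldl_map, List.foldl_map]
  simp only [pv_or_qdict, pv_or_cdict]

-- ===== VERDICT (by name: the statement is the Claim_ definition above) =====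
theorem default_platform_to_simulator_channels_raises : Claim_raises_default_platform_to_simulator_channels := by
  unfold Claim_raises_default_platform_to_simulator_channels
  refine ⟨?_, by decide⟩
  intro qs cs _ hr
  unfold Pre_default_platform_to_simulator_channels
  simp [hr.1, hr.2]

theorem default_platform_to_simulator_channels_spec : Claim_equal_default_platform_to_simulator_channels := by
  intro qs cs _ hpre
  unfold Spec_default_platform_to_simulator_channels
  rw [pv_alt_eq_foldl]
  unfold default_platform_to_simulator_channels
  cases hq : qs with
  | cons q qs' =>
      simp only [List.map_cons, List.cons_append, List.foldl_cons, pv_or_empty_qdict]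
  | nil =>
      cases hc : cs with
      | nil =>
          rw [hq, hc] at hpre
          exact absurd hpre
            (default_platform_to_simulator_channels_raises.1 [] [] (by decide) ⟨rfl, rfl⟩)
      | cons c cs' =>
          simp only [List.map_nil, List.nil_append, List.map_cons, List.foldl_cons, pv_or_empty_cdict]
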